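-- pv_equiv track=rewrite | github.com/sangyun0904/BOJ_python_solve | kakao/kakao_2019_intern_banned_id.py | isBan
-- ===== SOURCE A (Python) =====
-- def isBan(users, banned_id):
--     for i in range(len(users)):
--         user = users[i]
--         ban = banned_id[i]
--         if len(user) != len(ban):
--             return False
--         for j in range(len(user)):
--             if ban[j] != "*":
--                 if ban[j] != user[j]:
--                     return False
--     return True
-- ===== SOURCE B (Python) =====
-- import re
--
-- def isBan(users, banned_id):
--     for user, ban in zip(users, banned_id):
--         pattern = ''.join('.' if c == '*' else re.escape(c) for c in ban)
--         if not re.fullmatch(pattern, user, re.DOTALL):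
--             return False
--     return True
-- ===== Notes on version B (the rewrite author's own statement) =====
-- stated objective: idiomatic
-- what changed: B replaces A's index-driven per-character comparison by compiling each ban into a wildcard regex (''.join('.' if c=='*' else re.escape(c)) ) and testing each pair with re.fullmatch(..., re.DOTALL) over zip(users, banned_id).
-- outside the precondition, e.g. on isBan(['x', 'y'], ['a']): A returns False, B returns False; on isBan(['a', 'b'], ['a']): A raises IndexError, B returns True
import Mathlib
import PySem

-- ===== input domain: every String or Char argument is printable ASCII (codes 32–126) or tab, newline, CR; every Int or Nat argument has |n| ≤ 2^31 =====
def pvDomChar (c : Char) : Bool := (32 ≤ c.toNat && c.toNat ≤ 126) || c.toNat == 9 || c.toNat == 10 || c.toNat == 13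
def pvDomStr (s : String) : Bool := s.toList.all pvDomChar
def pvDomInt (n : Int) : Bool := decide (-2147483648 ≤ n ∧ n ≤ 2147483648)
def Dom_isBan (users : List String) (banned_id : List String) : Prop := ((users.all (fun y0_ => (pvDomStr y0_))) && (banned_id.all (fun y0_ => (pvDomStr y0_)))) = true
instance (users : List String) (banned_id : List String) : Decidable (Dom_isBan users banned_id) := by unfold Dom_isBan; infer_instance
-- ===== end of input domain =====

-- B replaces A's index-driven character comparison by compiling each ban into a
-- wildcard pattern and matching it against the user (re.fullmatch with DOTALL);
-- objective: idiomatic, not faster.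

-- ===== PORT A =====
-- inner 'for j in range(len(user))' loop; a 'return False' inside the loop exits the whole call
def isBanInnerLoop (user ban : String) : List Int → Bool
  | [] => true
  | j :: js =>
    match PySem.Str.pyGet? ban j, PySem.Str.pyGet? user j with
    | some bc, some uc =>
      if bc ≠ '*' then
        if bc ≠ uc then false else isBanInnerLoop user ban js
      else isBanInnerLoop user ban js
    | _, _ => false  -- unreachable: j ∈ range(len(user)) and len(ban) = len(user)

-- outer 'for i in range(len(users))' loop
def isBanOuterLoop (users banned_id : List String) : List Int → Bool
  | [] => true
  | i :: is =>
    match PySem.List.pyGet? users i, PySem.List.pyGet? banned_id i with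
    | some user, some ban =>
      if PySem.Str.len user ≠ PySem.Str.len ban then false
      else if isBanInnerLoop user ban (PySem.List.pyRange 0 (PySem.Str.len user) 1) then
        isBanOuterLoop users banned_id is
      else false
    | _, _ => false  -- banned_id[i] IndexError: excluded by Pre_isBan

def isBan (users : List String) (banned_id : List String) : Bool :=
  isBanOuterLoop users banned_id (PySem.List.pyRange 0 (users.length : Int) 1)

-- ===== PORT B =====
-- a compiled pattern token: '.' (from '*', matches any char under DOTALL) or an escaped literal
inductive RTok
  | dot : RTok
  | lit : Char → RTok
deriving DecidableEq, Repr

-- ''.join('.' if c == '*' else re.escape(c) for c in ban)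
def buildPattern (ban : List Char) : List RTok :=
  ban.map (fun c => if c = '*' then RTok.dot else RTok.lit c)

-- re.fullmatch(pattern, user, re.DOTALL), exact for patterns made of '.' and escaped
-- literal characters: each token consumes exactly one character
def reFullmatch : List RTok → List Char → Bool
  | [], [] => true
  | RTok.dot :: ps, _ :: cs => reFullmatch ps cs
  | RTok.lit a :: ps, c :: cs => a = c && reFullmatch ps cs
  | _, _ => false

def isBan_alt (users : List String) (banned_id : List String) : Bool :=
  (users.zip banned_id).all (fun p => reFullmatch (buildPattern p.2.toList) p.1.toList)

-- ===== PRECONDITION & SPEC =====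
-- Pre_ excludes inputs with more users than banned patterns: there A raises IndexError
-- once the pattern list is exhausted (though it may return False earlier), while B's
-- zip silently truncates.
def Pre_isBan (users : List String) (banned_id : List String) : Prop :=
  users.length ≤ banned_id.length
instance (users : List String) (banned_id : List String) : Decidable (Pre_isBan users banned_id) := by unfold Pre_isBan; infer_instance

def pvWitness_isBan : List String × List String := (["ab", "xy"], ["a*", "x*"])

def Spec_isBan (users : List String) (banned_id : List String) (out : Bool) : Prop := out = isBan_alt users banned_id
instance (users : List String) (banned_id : List String) (out : Bool) : Decidable (Spec_isBan users banned_id out) := by unfold Spec_isBan; infer_instance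

-- ===== CLAIM (what is proved, stated in full; the proofs are below) =====
def Claim_equal_isBan : Prop := ∀ (users : List String) (banned_id : List String), Dom_isBan users banned_id → Pre_isBan users banned_id → Spec_isBan users banned_id (isBan users banned_id)

-- ===== LEMMAS AND PROOFS =====

theorem reFullmatch_length_ne (ps : List RTok) (cs : List Char)
    (h : ps.length ≠ cs.length) : reFullmatch ps cs = false := by
  induction ps generalizing cs with
  | nil => cases cs with
    | nil => simp at h
    | cons c cs => rfl
  | cons p ps ih =>
    cases cs with
    | nil => cases p <;> rfl
    | cons c cs =>
      have : ps.length ≠ cs.length := by simpa using h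
      cases p with
      | dot => simpa [reFullmatch] using ih cs this
      | lit a => simp [reFullmatch, ih cs this]

-- the inner loop over range(a, len(user)) matches suffix-against-suffix
theorem innerLoop_eq (user ban : String) (h : user.toList.length = ban.toList.length)
    (a : Nat) (ha : a ≤ user.toList.length) :
    isBanInnerLoop user ban (PySem.List.pyRange (a : Int) (user.toList.length : Int) 1)
      = reFullmatch (buildPattern (ban.toList.drop a)) (user.toList.drop a) := by
  by_cases hlt : a < user.toList.length
  · rw [PySem.List.pyRange_one_cons (by exact_mod_cast hlt)]
    have hu : PySem.Str.pyGet? user (a : Int) = some (user.toList[a]) := by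
      simp [List.getElem?_eq_getElem hlt]
    have hb : PySem.Str.pyGet? ban (a : Int) = some (ban.toList[a]'(by omega)) := by
      simp [List.getElem?_eq_getElem (show a < ban.toList.length by omega)]
    have hdu : user.toList.drop a = user.toList[a] :: user.toList.drop (a+1) :=
      List.drop_eq_getElem_cons hlt
    have hdb : ban.toList.drop a = ban.toList[a]'(by omega) :: ban.toList.drop (a+1) :=
      List.drop_eq_getElem_cons (by omega)
    have ih := innerLoop_eq user ban h (a+1) (by omega)
    push_cast at ih
    simp only [isBanInnerLoop, hu, hb]
    rw [hdb, hdu]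
    simp only [buildPattern, List.map_cons] at ih ⊢
    by_cases hstar : ban.toList[a]'(by omega) = '*'
    · rw [if_pos hstar, if_neg (show ¬ (ban.toList[a]'(by omega) ≠ '*') by simp [hstar])]
      simpa [reFullmatch] using ih
    · rw [if_neg hstar, if_pos hstar]
      by_cases heq : ban.toList[a]'(by omega) = user.toList[a]
      · rw [if_neg (show ¬ (ban.toList[a]'(by omega) ≠ user.toList[a]) by simp [heq])]
        simpa [reFullmatch, heq] using ih
      · rw [if_pos heq]
        simp [reFullmatch, heq]
  · have hae : a = user.toList.length := by omega
    subst hae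
    rw [PySem.List.pyRange_one_eq_nil (by omega)]
    have h1 : user.toList.drop user.toList.length = [] := List.drop_length
    have h2 : ban.toList.drop user.toList.length = [] := by rw [h]; exact List.drop_length
    rw [h1, h2]
    rfl
termination_by user.toList.length - a
decreasing_by have : a < user.toList.length := hlt; omega

theorem buildPattern_length (b : List Char) : (buildPattern b).length = b.length := by
  simp [buildPattern]

-- one pair of A's outer body equals one regex test of B
theorem pair_eq (user ban : String) :
    (if (PySem.Str.len user ≠ PySem.Str.len ban) then false
     else isBanInnerLoop user ban (PySem.List.pyRange 0 (PySem.Str.len user) 1))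
      = reFullmatch (buildPattern ban.toList) user.toList := by
  have hu' : user.toList.length = user.length := by simp
  have hb' : ban.toList.length = ban.length := by simp
  by_cases hlen : user.toList.length = ban.toList.length
  · have h1 : user.length = ban.length := by omega
    rw [if_neg (by simp [PySem.Str.len_eq, h1])]
    have := innerLoop_eq user ban hlen 0 (Nat.zero_le _)
    simpa [PySem.Str.len_eq] using this
  · rw [if_pos (by simp only [PySem.Str.len_eq]; intro hc; omega)]
    rw [reFullmatch_length_ne]
    rw [buildPattern_length]
    omega

-- the outer loop over range(a, len(users)) equals B's all over the zipped suffixes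
theorem outerLoop_eq (users banned_id : List String)
    (hpre : users.length ≤ banned_id.length) (a : Nat) :
    isBanOuterLoop users banned_id (PySem.List.pyRange (a : Int) (users.length : Int) 1)
      = ((users.drop a).zip (banned_id.drop a)).all
          (fun p => reFullmatch (buildPattern p.2.toList) p.1.toList) := by
  by_cases hlt : a < users.length
  · rw [PySem.List.pyRange_one_cons (by exact_mod_cast hlt)]
    have hu : PySem.List.pyGet? users (a : Int) = some (users[a]) := by
      simp [List.getElem?_eq_getElem hlt]
    have hb : PySem.List.pyGet? banned_id (a : Int) = some (banned_id[a]'(by omega)) := by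
      simp [List.getElem?_eq_getElem (show a < banned_id.length by omega)]
    have hdu : users.drop a = users[a] :: users.drop (a+1) := List.drop_eq_getElem_cons hlt
    have hdb : banned_id.drop a = (banned_id[a]'(by omega)) :: banned_id.drop (a+1) :=
      List.drop_eq_getElem_cons (by omega)
    have ih := outerLoop_eq users banned_id hpre (a+1)
    push_cast at ih
    simp only [isBanOuterLoop, hu, hb, hdu, hdb, List.zip_cons_cons, List.all_cons]
    have hp := pair_eq (users[a]) (banned_id[a]'(by omega))
    by_cases hlen : PySem.Str.len (users[a]) ≠ PySem.Str.len (banned_id[a]'(by omega))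
    · rw [if_pos hlen]
      rw [if_pos hlen] at hp
      simp [← hp]
    · rw [if_neg hlen]
      rw [if_neg hlen] at hp
      by_cases hin : isBanInnerLoop (users[a]) (banned_id[a]'(by omega))
          (PySem.List.pyRange 0 (PySem.Str.len (users[a])) 1) = true
      · rw [if_pos hin, ← hp, hin, ih]
        simp
      · rw [if_neg hin, ← hp, Bool.eq_false_iff.mpr hin, Bool.false_and]
  · rw [PySem.List.pyRange_one_eq_nil (by exact_mod_cast Nat.le_of_not_lt hlt)]
    rw [List.drop_of_length_le (Nat.le_of_not_lt hlt)]
    simp [isBanOuterLoop]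
termination_by users.length - a
decreasing_by have : a < users.length := hlt; omega

-- ===== VERDICT (by name: the statement is the Claim_ definition above) =====
theorem isBan_spec : Claim_equal_isBan := by
  intro users banned_id _hdom hpre
  unfold Spec_isBan isBan isBan_alt
  have := outerLoop_eq users banned_id hpre 0
  simpa using this
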